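-- pv_equiv track=rewrite | github.com/TaeyanG4/Baekjoon | 백준/Bronze/15873. 공백 없는 A＋B/공백 없는 A＋B.py | solution
-- ===== SOURCE A (Python) =====
-- def solution(n):
--     p = 0
--     n = list(n)
--     ans = list()
--     for _ in range(len(n)):
--         a = n.pop()
--         if a == '0':
--             p += 1
--         else:
--             ans += [int(a) * (10 ** p)]
--             p = 0
--     return sum(ans)
-- ===== SOURCE B (Python) =====
-- def solution(n):
--     total = 0
--     cur = 0
--     for ch in n:
--         if ch == '0':
--             cur *= 10
--         else:
--             total += cur
--             cur = int(ch)
--     return total + cur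
-- ===== Notes on version B (the rewrite author's own statement) =====
-- stated objective: simpler
-- what changed: A reverses the string by repeated pop(), accumulates a list of weighted digits and sums it; B is a single forward pass keeping two integers (running total and current weighted digit, multiplied by 10 for each following zero), no list, no reversal, no final sum.
import Mathlib
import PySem

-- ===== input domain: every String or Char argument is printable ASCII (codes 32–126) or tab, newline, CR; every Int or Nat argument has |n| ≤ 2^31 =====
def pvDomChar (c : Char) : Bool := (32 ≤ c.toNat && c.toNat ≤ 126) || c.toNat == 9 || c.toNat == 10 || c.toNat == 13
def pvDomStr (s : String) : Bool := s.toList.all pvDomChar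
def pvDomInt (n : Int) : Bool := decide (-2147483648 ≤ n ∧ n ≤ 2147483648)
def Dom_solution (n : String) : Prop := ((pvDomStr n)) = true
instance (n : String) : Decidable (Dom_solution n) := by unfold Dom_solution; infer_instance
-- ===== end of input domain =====

-- B is a single forward pass with two integer accumulators instead of A's pop-from-the-end
-- loop that builds and sums a list of weighted digits (objective: simpler).

-- ===== PORT A =====
-- int(a) for the single digit chars admitted by Pre_ (exact there):
def pvDigit (c : Char) : Int := (c.toNat : Int) - 48

-- the loop: `for _ in range(len(n)): a = n.pop(); …` pops from the end, i.e. it consumes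
-- the reversed character list; state is (p, ans) exactly as in A.
def solGoA : List Char → Nat → List Int → List Int
  | [], _, ans => ans
  | a :: rest, p, ans =>
    if a = '0' then solGoA rest (p + 1) ans
    else solGoA rest 0 (ans ++ [pvDigit a * (10 : Int) ^ p])

def solution (n : String) : Int :=
  (solGoA n.toList.reverse 0 []).sum

-- ===== PORT B =====
def solStepB (st : Int × Int) (ch : Char) : Int × Int :=
  if ch = '0' then (st.1, st.2 * 10) else (st.1 + st.2, pvDigit ch)

def solution_alt (n : String) : Int :=
  let st := n.toList.foldl solStepB (0, 0)
  st.1 + st.2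

-- ===== PRECONDITION & SPEC =====
-- A raises ValueError (int(a)) on any character that is not an ASCII digit; exactly those inputs are excluded.
def Pre_solution (n : String) : Prop := (n.toList.all Char.isDigit) = true
instance (n : String) : Decidable (Pre_solution n) := by unfold Pre_solution; infer_instance

def pvWitness_solution : String := "105"

def Spec_solution (n : String) (out : Int) : Prop := out = solution_alt n
instance (n : String) (out : Int) : Decidable (Spec_solution n out) := by unfold Spec_solution; infer_instance

-- ===== CLAIM (what is proved, stated in full; the proofs are below) =====
def Claim_equal_solution : Prop := ∀ (n : String), Dom_solution n → Pre_solution n → Spec_solution n (solution n)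

-- ===== LEMMAS AND PROOFS =====

-- number of leading '0' characters
def pvLead0 : List Char → Nat
  | [] => 0
  | c :: l => if c = '0' then pvLead0 l + 1 else 0

-- reference value: each non-'0' digit weighted by 10^(number of '0's immediately after it)
def pvS : List Char → Int
  | [] => 0
  | c :: l => (if c = '0' then 0 else pvDigit c * (10 : Int) ^ pvLead0 l) + pvS l

theorem pvLead0_replicate (p : Nat) : pvLead0 (List.replicate p '0') = p := by
  induction p with
  | zero => rfl
  | succ p ih => simp [List.replicate, pvLead0, ih]

theorem pvS_replicate (p : Nat) : pvS (List.replicate p '0') = 0 := by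
  induction p with
  | zero => rfl
  | succ p ih => simp [List.replicate, pvS, ih]

theorem pvLead0_append (xs : List Char) (c : Char) (t : List Char) (hc : c ≠ '0') :
    pvLead0 (xs ++ c :: t) = pvLead0 xs := by
  induction xs with
  | nil => simp [pvLead0, hc]
  | cons x xs ih => by_cases hx : x = '0' <;> simp [pvLead0, hx, ih]

theorem pvS_append (xs : List Char) (c : Char) (p : Nat) (hc : c ≠ '0') :
    pvS (xs ++ c :: List.replicate p '0') = pvS xs + pvDigit c * (10 : Int) ^ p := by
  induction xs with
  | nil => simp [pvS, hc, pvLead0_replicate, pvS_replicate]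
  | cons x xs ih =>
    by_cases hx : x = '0' <;>
      simp [pvS, hx, ih, pvLead0_append xs c (List.replicate p '0') hc] <;> ring

theorem solGoA_sum (r : List Char) (p : Nat) (ans : List Int) :
    (solGoA r p ans).sum = ans.sum + pvS (r.reverse ++ List.replicate p '0') := by
  induction r generalizing p ans with
  | nil => simp [solGoA, pvS_replicate]
  | cons a rest ih =>
    by_cases ha : a = '0'
    · have : rest.reverse ++ '0' :: List.replicate p '0'
            = rest.reverse ++ List.replicate (p + 1) '0' := by
        simp [List.replicate_succ]
      simp [solGoA, ha, ih, this]
    · simp [solGoA, ha, ih, pvS_append rest.reverse a p ha]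
      ring

theorem solStepB_inv (l : List Char) (t c : Int) :
    (l.foldl solStepB (t, c)).1 + (l.foldl solStepB (t, c)).2
      = t + c * (10 : Int) ^ pvLead0 l + pvS l := by
  induction l generalizing t c with
  | nil => simp [pvLead0, pvS]
  | cons x l ih =>
    by_cases hx : x = '0' <;> simp [solStepB, hx, pvLead0, pvS, ih] <;> ring

-- ===== VERDICT (by name: the statement is the Claim_ definition above) =====
theorem solution_spec : Claim_equal_solution := by
  intro n _ _
  unfold Spec_solution solution solution_alt
  have hA := solGoA_sum n.toList.reverse 0 []
  have hB := solStepB_inv n.toList 0 0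
  simp at hA
  simp [hA, hB]
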